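-- pv_equiv track=rewrite | github.com/GraceKim527/BOJ_study | Programmers/Level 1/과일 장수.py | solution
-- ===== SOURCE A (Python) =====
-- def solution(k, m, score):
--     score.sort(reverse=True) # 내림차순
--     score_list = []
--     answer = 0
--     tmp = 0
--     for _ in range(len(score)//m): # 슬라이싱 해야하는 휫수
--         score_list.append(score[tmp:tmp+m])
--         tmp += m
--     for i in range(len(score_list)):
--         answer += min(score_list[i]) * m
--
--     return answer
-- ===== SOURCE B (Python) =====
-- def solution(k, m, score):
--     s = sorted(score, reverse=True)
--     total = 0
--     for i in range(m - 1, len(s) - len(s) % m, m):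
--         total += s[i]
--     return total * m
-- ===== Notes on version B (the rewrite author's own statement) =====
-- stated objective: simpler
-- what changed: Instead of building a list of m-sized slices and taking min() of each, B strides directly over every m-th element of the descending-sorted list (the minimum of each group) and sums them once.
import Mathlib
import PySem

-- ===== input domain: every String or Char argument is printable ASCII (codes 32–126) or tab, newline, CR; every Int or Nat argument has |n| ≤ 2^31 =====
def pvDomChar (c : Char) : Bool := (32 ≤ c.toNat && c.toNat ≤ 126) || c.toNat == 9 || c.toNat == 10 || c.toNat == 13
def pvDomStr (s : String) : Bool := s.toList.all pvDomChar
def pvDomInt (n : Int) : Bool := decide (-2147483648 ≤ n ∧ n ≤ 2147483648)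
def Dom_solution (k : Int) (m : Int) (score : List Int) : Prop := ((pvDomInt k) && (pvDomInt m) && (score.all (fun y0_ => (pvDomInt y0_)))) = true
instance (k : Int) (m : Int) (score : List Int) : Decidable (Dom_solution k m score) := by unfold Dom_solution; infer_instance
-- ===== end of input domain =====

-- B replaces A's chunk-building + per-chunk min with a direct stride over every m-th
-- element of the sorted list (objective: simpler). A sorts `score` in place; the
-- equivalence proved here is about the return value only (B does not mutate its argument).

-- ===== PORT A =====
def solution (k : Int) (m : Int) (score : List Int) : Int :=
  let s := PySem.List.sorted score (fun x => x) true
  -- first loop: build score_list of slices, tmp advancing by m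
  let st :=
    (PySem.List.pyRange 0 (PySem.Int.floordiv (s.length : Int) m) 1).foldl
      (fun (st : List (List Int) × Int) _ =>
        (st.1 ++ [PySem.List.slice s (some st.2) (some (st.2 + m))], st.2 + m))
      ([], 0)
  let score_list := st.1
  -- second loop: answer += min(score_list[i]) * m  (min never hits [] when m ≠ 0)
  (PySem.List.pyRange 0 (score_list.length : Int) 1).foldl
    (fun answer i =>
      answer + ((PySem.List.min? (PySem.List.pyGetD score_list i []) (fun x => x)).getD 0) * m)
    0

-- ===== PORT B =====
def solution_alt (k : Int) (m : Int) (score : List Int) : Int :=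
  let s := PySem.List.sorted score (fun x => x) true
  let n : Int := s.length
  let total :=
    (PySem.List.pyRange (m - 1) (n - PySem.Int.mod n m) m).foldl
      (fun acc i => acc + PySem.List.pyGetD s i 0) 0
  total * m

-- ===== PRECONDITION & SPEC =====
-- Pre_ excludes exactly m = 0, where Python's len(score)//m (A) and len(s) % m (B) raise ZeroDivisionError.
def Pre_solution (k : Int) (m : Int) (score : List Int) : Prop := m ≠ 0
instance (k : Int) (m : Int) (score : List Int) : Decidable (Pre_solution k m score) := by unfold Pre_solution; infer_instance
def pvWitness_solution : Int × Int × List Int := (4, 2, [1, 4, 2, 4, 3])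

def Spec_solution (k : Int) (m : Int) (score : List Int) (out : Int) : Prop := out = solution_alt k m score
instance (k : Int) (m : Int) (score : List Int) (out : Int) : Decidable (Spec_solution k m score out) := by unfold Spec_solution; infer_instance

-- ===== CLAIM (what is proved, stated in full; the proofs are below) =====
def Claim_equal_solution : Prop := ∀ (k : Int) (m : Int) (score : List Int), Dom_solution k m score → Pre_solution k m score → Spec_solution k m score (solution k m score)

-- ===== LEMMAS AND PROOFS =====

theorem slice_arg_congr (s : List Int) {a a' b b' : Int} (ha : a = a') (hb : b = b') :
    PySem.List.slice s (some a) (some b) = PySem.List.slice s (some a') (some b') := by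
  subst ha; subst hb; rfl

-- A's first loop: appending slices while tmp advances by m builds the list of chunks.
theorem chunk_loop (s : List Int) (m : Int) (L : List Int) (acc : List (List Int)) (t0 : Int) :
    L.foldl (fun (st : List (List Int) × Int) _ =>
        (st.1 ++ [PySem.List.slice s (some st.2) (some (st.2 + m))], st.2 + m)) (acc, t0)
      = (acc ++ (List.range L.length).map
          (fun (j : Nat) => PySem.List.slice s (some (t0 + m * (j : Int))) (some (t0 + m * (j : Int) + m))),
         t0 + m * L.length) := by
  induction L generalizing acc t0 with
  | nil => simp
  | cons x xs ih =>
      simp only [List.foldl_cons, ih (acc ++ [PySem.List.slice s (some t0) (some (t0 + m))]) (t0 + m)]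
      simp only [Prod.mk.injEq]
      constructor
      · rw [List.length_cons, List.range_succ_eq_map, List.map_cons, List.map_map,
            List.append_assoc, List.singleton_append]
        congr 1
        rw [List.cons.injEq]
        constructor
        · exact slice_arg_congr s (by norm_num) (by norm_num)
        · apply List.map_congr_left
          intro j _
          simp only [Function.comp_apply, Nat.succ_eq_add_one]
          exact slice_arg_congr s (by push_cast; ring) (by push_cast; ring)
      · simp only [List.length_cons]; push_cast; ring

-- min of a nonempty descending chunk (drop d, take mN) is the chunk's last element s[d+mN-1].
theorem min_chunk (s : List Int) (hs : List.Pairwise (fun a b => b ≤ a) s)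
    (d mN : Nat) (hm : 0 < mN) (hle : d + mN ≤ s.length) :
    (PySem.List.min? ((s.drop d).take mN) (fun x => x)).getD 0
      = s[d + mN - 1]'(by omega) := by
  have hlen : ((s.drop d).take mN).length = mN := by
    simp only [List.length_take, List.length_drop]; omega
  have hmono : ∀ (i j : Nat) (hi : i < s.length) (hj : j < s.length), i ≤ j → s[j] ≤ s[i] := by
    intro i j hi hj hij
    rcases Nat.lt_or_ge i j with h | h
    · exact List.pairwise_iff_getElem.mp hs i j hi hj h
    · have : i = j := by omega
      subst this; exact le_refl _
  have hne : (s.drop d).take mN ≠ [] := by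
    intro h; rw [h] at hlen; simp at hlen; omega
  obtain ⟨x, hx⟩ : ∃ x, PySem.List.min? ((s.drop d).take mN) (fun x => x) = some x := by
    cases hmin : PySem.List.min? ((s.drop d).take mN) (fun x => x) with
    | none => exact absurd ((PySem.List.min?_eq_none_iff _ _).mp hmin) hne
    | some x => exact ⟨x, rfl⟩
  rw [hx, Option.getD_some]
  have hchunk_elem : ∀ (p : Nat) (hp : p < mN), ((s.drop d).take mN)[p]'(by omega) = s[d + p]'(by omega) := by
    intro p hp
    rw [List.getElem_take, List.getElem_drop]
  have hlast_mem : s[d + mN - 1]'(by omega) ∈ (s.drop d).take mN := by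
    rw [List.mem_iff_getElem]
    refine ⟨mN - 1, by omega, ?_⟩
    rw [hchunk_elem (mN - 1) (by omega)]
    congr 1; omega
  have h1 : x ≤ s[d + mN - 1]'(by omega) := PySem.List.min?_isMin hx _ hlast_mem
  have h2 : s[d + mN - 1]'(by omega) ≤ x := by
    have hxmem := PySem.List.min?_mem hx
    rw [List.mem_iff_getElem] at hxmem
    obtain ⟨p, hp, hpx⟩ := hxmem
    rw [hlen] at hp
    rw [hchunk_elem p hp] at hpx
    rw [← hpx]
    exact hmono (d + p) (d + mN - 1) (by omega) (by omega) (by omega)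
  omega

-- both folds as a sum over chunk indices, by induction on the number of chunks
theorem sum_stride (g : Nat → Int) (m : Int) (q : Nat) :
    (List.range q).foldl (fun (a : Int) j => a + g j * m) 0
      = ((List.range q).foldl (fun (a : Int) j => a + g j) 0) * m := by
  induction q with
  | zero => simp
  | succ q ih =>
      rw [List.range_succ, List.foldl_append, List.foldl_append]
      simp only [List.foldl_cons, List.foldl_nil, ih]
      ring

-- ===== VERDICT (by name: the statement is the Claim_ definition above) =====
theorem solution_spec : Claim_equal_solution := by
  intro k m score _hdom hm
  unfold Spec_solution solution solution_alt
  simp only []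
  set s := PySem.List.sorted score (fun x => x) true with hs_def
  rcases lt_trichotomy m 0 with hneg | hz | hpos
  · -- m < 0 : both sides are 0
    have hq : PySem.Int.floordiv (s.length : Int) m ≤ 0 := by
      have h1 := PySem.Int.floordiv_mul_add_mod (s.length : Int) m
      have h2 := PySem.Int.mod_neg_bounds (s.length : Int) hneg
      nlinarith [Int.natCast_nonneg s.length]
    rw [PySem.List.pyRange_one_eq_nil hq]
    simp only [List.foldl_nil, List.length_nil, Nat.cast_zero]
    rw [PySem.List.pyRange_one_eq_nil (le_refl 0)]
    simp only [List.foldl_nil]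
    have hrange : PySem.List.pyRange (m - 1) ((s.length : Int) - PySem.Int.mod (s.length : Int) m) m = [] := by
      have h2 := PySem.Int.mod_neg_bounds (s.length : Int) hneg
      have h3 := Int.natCast_nonneg s.length
      unfold PySem.List.pyRange
      rw [if_neg hm, if_neg (by omega : ¬ (0 : Int) < m), if_neg (by omega)]
      simp
    rw [hrange]
    simp
  · exact absurd hz hm
  · -- m > 0
    obtain ⟨M, hM⟩ : ∃ M : Nat, m = (M : Int) := ⟨m.toNat, (Int.toNat_of_nonneg (le_of_lt hpos)).symm⟩
    have hM1 : 1 ≤ M := by omega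
    set n : Nat := s.length with hn_def
    have hfd : PySem.Int.floordiv (n : Int) m = (n : Int) / m := PySem.Int.floordiv_eq_ediv_of_pos hpos
    have hmd : PySem.Int.mod (n : Int) m = (n : Int) % m := PySem.Int.mod_eq_emod_of_pos hpos
    rw [hfd, hmd]
    set q : Int := (n : Int) / m with hq_def
    have hq0 : 0 ≤ q := Int.ediv_nonneg (by positivity) (by omega)
    set qn : Nat := q.toNat with hqn_def
    have hqq : (qn : Int) = q := Int.toNat_of_nonneg hq0
    have hbound : (qn : Int) * m ≤ (n : Int) := by
      rw [hqq, hq_def]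
      exact Int.ediv_mul_le _ (by omega)
    have hidx : ∀ j : Nat, j < qn → M * j + M ≤ n := by
      intro j hj
      have h1 : ((j : Int) + 1) * m ≤ (qn : Int) * m :=
        mul_le_mul_of_nonneg_right (by exact_mod_cast Nat.succ_le_of_lt hj) (by omega)
      have h2 : ((j : Int) + 1) * m ≤ (n : Int) := le_trans h1 hbound
      have h3 : ((M * j + M : Nat) : Int) = ((j : Int) + 1) * m := by push_cast [hM]; ring
      exact_mod_cast h3 ▸ h2
    -- A: first loop builds the chunk list
    rw [chunk_loop s m (PySem.List.pyRange 0 q 1) [] 0]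
    simp only [List.nil_append, PySem.List.length_pyRange_one, Int.sub_zero, ← hqn_def]
    set score_list : List (List Int) :=
      (List.range qn).map (fun (j : Nat) => PySem.List.slice s (some (0 + m * (j : Int))) (some (0 + m * (j : Int) + m))) with hsl_def
    -- A: second loop over score_list
    rw [PySem.List.foldl_pyRange_zero_pyGetD' score_list []
      (fun (answer : Int) (g : List Int) => answer + ((PySem.List.min? g (fun x => x)).getD 0) * m) 0]
    rw [hsl_def, List.foldl_map]
    have hpair : List.Pairwise (fun a b => b ≤ a) s := by
      have := PySem.List.sorted_pairwise_rev score (fun x : Int => x)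
      simpa using this
    -- each chunk's min is the chunk's last element, read as a total getD
    have hchunk : ∀ j : Nat, j < qn →
        ((PySem.List.min? (PySem.List.slice s (some (0 + m * (j : Int))) (some (0 + m * (j : Int) + m))) (fun x => x)).getD 0)
          = s.getD (M * j + M - 1) 0 := by
      intro j hj
      have hle := hidx j hj
      have hp1 : m * (j : Int) = ((M * j : Nat) : Int) := by push_cast [hM]; ring
      have hsl : PySem.List.slice s (some (0 + m * (j : Int))) (some (0 + m * (j : Int) + m))
          = (s.drop (M * j)).take M := by
        rw [PySem.List.slice_toNat s (by rw [hp1]; positivity) (by rw [hp1, hM]; positivity)]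
        congr 1
        · rw [hM] at hp1 ⊢; rw [hp1]; omega
        · congr 1; rw [hp1]; omega
      rw [hsl, min_chunk s hpair (M * j) M hM1 (by omega),
          List.getD_eq_getElem s 0 (by omega : M * j + M - 1 < n)]
    -- B: the stride range
    have hstop : (n : Int) - (n : Int) % m = q * m := by
      rw [hq_def, Int.emod_def]; try ring
    rw [hstop]
    have hcnt : (if m - 1 < q * m then ((q * m - (m - 1) + m - 1) / m).toNat else 0) = qn := by
      rcases Nat.eq_zero_or_pos qn with h0 | h1
      · rw [if_neg]
        · omega
        · have hq' : q = 0 := by omega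
          rw [hq']; omega
      · rw [if_pos]
        · have he : q * m - (m - 1) + m - 1 = q * m := by ring
          rw [he, Int.mul_ediv_cancel _ (by omega)]
        · have h2 : (1 : Int) * m ≤ q * m :=
            mul_le_mul_of_nonneg_right (by omega) (by omega)
          omega
    have hB1 : PySem.List.pyRange (m - 1) (q * m) m
        = (List.range qn).map (fun k : Nat => (m - 1) + m * (k : Int)) := by
      rw [PySem.List.pyRange_of_pos _ _ hpos, hcnt]
    rw [hB1, List.foldl_map]
    -- each stride element reads the same getD
    have hstrd : ∀ j : Nat, j < qn →
        PySem.List.pyGetD s ((m - 1) + m * (j : Int)) 0 = s.getD (M * j + M - 1) 0 := by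
      intro j hj
      have hle := hidx j hj
      have hp1 : m * (j : Int) = ((M * j : Nat) : Int) := by push_cast [hM]; ring
      rw [PySem.List.pyGetD_eq_getElem s 0 (by rw [hp1, hM]; push_cast; omega)
            (by rw [hp1, hM]; push_cast; omega),
          List.getD_eq_getElem s 0 (by omega : M * j + M - 1 < n)]
      congr 1
      rw [hp1, hM]
      omega
    rw [List.foldl_ext
          (fun (answer : Int) (j : Nat) => answer + ((PySem.List.min? (PySem.List.slice s (some (0 + m * (j : Int))) (some (0 + m * (j : Int) + m))) (fun x => x)).getD 0) * m)
          (fun (a : Int) (j : Nat) => a + s.getD (M * j + M - 1) 0 * m) 0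
          (by intro a j hj; rw [List.mem_range] at hj; simp only []; rw [hchunk j hj]),
        List.foldl_ext
          (fun (acc : Int) (j : Nat) => acc + PySem.List.pyGetD s ((m - 1) + m * (j : Int)) 0)
          (fun (a : Int) (j : Nat) => a + s.getD (M * j + M - 1) 0) 0
          (by intro a j hj; rw [List.mem_range] at hj; simp only []; rw [hstrd j hj])]
    exact sum_stride (fun j => s.getD (M * j + M - 1) 0) m qn
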